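-- pv_equiv track=rewrite | github.com/thaingern001/SignalProject2024 | model2.py | identify_chord
-- ===== SOURCE A (Python) =====
-- from itertools import permutations
--
-- note_to_num = {'C': 0, 'C#': 1, 'D': 2, 'D#': 3, 'E': 4, 'F': 5,
--                'F#': 6, 'G': 7, 'G#': 8, 'A': 9, 'A#': 10, 'B': 11}
--
-- num_to_note = {v: k for k, v in note_to_num.items()}
--
-- chords = {
--     "": [0, 4, 7], #Major
--     "m": [0, 3, 7]
-- }
--
-- def identify_chord(notes):
--     # แปลงโน้ตเป็นตัวเลข
--     nums = [note_to_num[n] for n in notes]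
--
--     for perm in permutations(nums):  # ลองทุกลำดับของโน้ต
--         root = perm[0]
--         intervals = [(n - root) % 12 for n in perm]
--
--         for chord_name, pattern in chords.items():
--             if intervals == pattern:
--                 return f"{num_to_note[root]}{chord_name}"  # แสดงชื่อคอร์ดที่แท้จริง
--
--     return "Unknown Chord"
-- ===== SOURCE B (Python) =====
-- # B: precomputed lookup table keyed by the sorted pitch-class tuple,
-- # replacing A's factorial search over all note permutations.
--
-- note_to_num = {'C': 0, 'C#': 1, 'D': 2, 'D#': 3, 'E': 4, 'F': 5,
--                'F#': 6, 'G': 7, 'G#': 8, 'A': 9, 'A#': 10, 'B': 11}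
--
-- num_to_note = {v: k for k, v in note_to_num.items()}
--
-- chords = {
--     "": [0, 4, 7],  # Major
--     "m": [0, 3, 7]
-- }
--
-- # all 24 triads, keyed by their sorted pitch classes (all keys distinct)
-- _CHORD_TABLE = {}
-- for _root in range(12):
--     for _name, _pattern in chords.items():
--         _key = tuple(sorted((_root + i) % 12 for i in _pattern))
--         _CHORD_TABLE[_key] = f"{num_to_note[_root]}{_name}"
--
-- def identify_chord(notes):
--     key = tuple(sorted(note_to_num[n] for n in notes))
--     return _CHORD_TABLE.get(key, "Unknown Chord")
-- ===== Notes on version B (the rewrite author's own statement) =====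
-- stated objective: faster
-- what changed: Replaced the O(n!) itertools.permutations search with a precomputed 24-entry dict keyed by the sorted pitch-class tuple, so identification is one sort plus one hash lookup.
import Mathlib
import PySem

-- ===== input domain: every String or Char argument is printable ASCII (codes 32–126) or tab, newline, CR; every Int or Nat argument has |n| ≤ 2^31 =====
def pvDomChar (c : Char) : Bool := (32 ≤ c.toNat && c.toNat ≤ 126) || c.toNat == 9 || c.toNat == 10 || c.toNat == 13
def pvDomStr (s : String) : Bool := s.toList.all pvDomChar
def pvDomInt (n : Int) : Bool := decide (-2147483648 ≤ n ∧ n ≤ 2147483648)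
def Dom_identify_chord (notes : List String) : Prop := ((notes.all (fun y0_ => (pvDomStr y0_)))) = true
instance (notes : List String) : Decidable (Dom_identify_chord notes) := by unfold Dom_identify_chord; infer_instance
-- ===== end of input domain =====

-- ===== PORT A =====
-- B replaces A's factorial permutation search with a precomputed table keyed by the
-- sorted pitch-class list (a different algorithm); on [] A raises where B returns.
-- Shared module-level dicts.
def noteToNum : PySem.Dict String Int :=
  PySem.Dict.ofList [("C", 0), ("C#", 1), ("D", 2), ("D#", 3), ("E", 4), ("F", 5),
                     ("F#", 6), ("G", 7), ("G#", 8), ("A", 9), ("A#", 10), ("B", 11)]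

def numToNote : PySem.Dict Int String :=
  PySem.Dict.ofList [(0, "C"), (1, "C#"), (2, "D"), (3, "D#"), (4, "E"), (5, "F"),
                     (6, "F#"), (7, "G"), (8, "G#"), (9, "A"), (10, "A#"), (11, "B")]

-- chords dict, only ever iterated over its items, in insertion order
def chordsItems : List (String × List Int) := [("", [0, 4, 7]), ("m", [0, 3, 7])]

-- port of A; the `.getD` defaults are hit exactly where Python raises
-- (KeyError on an unknown note, IndexError via perm[0] on []), both excluded by Pre_.
def identify_chord (notes : List String) : String :=
  let nums := notes.map (fun n => (noteToNum.get? n).getD 0)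
  match (PySem.List.permutations nums nums.length).findSome? (fun perm =>
      let root := (PySem.List.pyGet? perm 0).getD 0
      let intervals := perm.map (fun n => PySem.Int.mod (n - root) 12)
      chordsItems.findSome? (fun cp =>
        if intervals = cp.2 then some ((numToNote.get? root).getD "" ++ cp.1) else none)) with
  | some s => s
  | none => "Unknown Chord"

-- ===== PORT B =====
-- the module-level table: for each root 0..11 and each chord, the sorted pitch classes
def chordTable : PySem.Dict (List Int) String :=
  (PySem.List.pyRange 0 12 1).foldl (fun t root =>
    chordsItems.foldl (fun t cp =>
      t.insert (PySem.List.sorted (cp.2.map (fun i => PySem.Int.mod (root + i) 12)) (fun x => x) false)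
               ((numToNote.get? root).getD "" ++ cp.1)) t)
    PySem.Dict.empty

def identify_chord_alt (notes : List String) : String :=
  let key := PySem.List.sorted (notes.map (fun n => (noteToNum.get? n).getD 0)) (fun x => x) false
  (chordTable.get? key).getD "Unknown Chord"

-- ===== PRECONDITION & SPEC =====
def noteKeys : List String :=
  ["C", "C#", "D", "D#", "E", "F", "F#", "G", "G#", "A", "A#", "B"]

-- Pre_ excludes exactly the inputs where Python A raises: the empty list (IndexError
-- on perm[0]) and lists containing a string that is not a note name (KeyError).
def Pre_identify_chord (notes : List String) : Prop :=
  notes ≠ [] ∧ ∀ n ∈ notes, n ∈ noteKeys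
instance (notes : List String) : Decidable (Pre_identify_chord notes) := by
  unfold Pre_identify_chord; infer_instance
def pvWitness_identify_chord : List String := ["C", "E", "G"]

def Spec_identify_chord (notes : List String) (out : String) : Prop := out = identify_chord_alt notes
instance (notes : List String) (out : String) : Decidable (Spec_identify_chord notes out) := by unfold Spec_identify_chord; infer_instance

-- ===== CLAIM (what is proved, stated in full; the proofs are below) =====
def Claim_equal_identify_chord : Prop := ∀ (notes : List String), Dom_identify_chord notes → Pre_identify_chord notes → Spec_identify_chord notes (identify_chord notes)

-- ===== LEMMAS AND PROOFS =====

-- both chord patterns have length 3, so an interval list of another length never matches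
lemma inner_none_of_len_ne_three (l : List Int) (v : String) (h : l.length ≠ 3) :
    chordsItems.findSome? (fun cp => if l = cp.2 then some (v ++ cp.1) else none) = none := by
  simp only [chordsItems, List.findSome?]
  have h1 : l ≠ [0, 4, 7] := fun he => h (by subst he; rfl)
  have h2 : l ≠ [0, 3, 7] := fun he => h (by subst he; rfl)
  simp [h1, h2]

lemma a_unknown_of_len_ne_three (notes : List String) (h : notes.length ≠ 3) :
    identify_chord notes = "Unknown Chord" := by
  unfold identify_chord
  have hnone : (PySem.List.permutations (notes.map (fun n => (noteToNum.get? n).getD 0))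
      ((notes.map (fun n => (noteToNum.get? n).getD 0)).length)).findSome? (fun perm =>
      let root := (PySem.List.pyGet? perm 0).getD 0
      let intervals := perm.map (fun n => PySem.Int.mod (n - root) 12)
      chordsItems.findSome? (fun cp =>
        if intervals = cp.2 then some ((numToNote.get? root).getD "" ++ cp.1) else none)) = none := by
    rw [List.findSome?_eq_none_iff]
    intro perm hmem
    have hp := PySem.List.perm_of_mem_permutations hmem
    have hlen : perm.length = notes.length := by
      simpa using hp.length_eq
    exact inner_none_of_len_ne_three _ _ (by simp [hlen]; omega)
  simp only [hnone]

-- every key of the precomputed table has length 3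
lemma table_keys_len_three : chordTable.keys.all (fun k => k.length == 3) = true := by decide

lemma b_unknown_of_len_ne_three (notes : List String) (h : notes.length ≠ 3) :
    identify_chord_alt notes = "Unknown Chord" := by
  unfold identify_chord_alt
  have hklen : (PySem.List.sorted (notes.map (fun n => (noteToNum.get? n).getD 0)) (fun x => x) false).length ≠ 3 := by
    simp [PySem.List.length_sorted]; omega
  have hget : chordTable.get? (PySem.List.sorted (notes.map (fun n => (noteToNum.get? n).getD 0)) (fun x => x) false) = none := by
    rw [PySem.Dict.get?_eq_none_iff_not_mem_keys]
    intro hmem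
    have := List.all_eq_true.mp table_keys_len_three _ hmem
    exact hklen (by simpa using this)
  simp only [hget, Option.getD_none]

-- the length-3 case, checked over all 12^3 concrete note triples
set_option maxHeartbeats 4000000 in
lemma triples_agree :
    ∀ n1 ∈ noteKeys, ∀ n2 ∈ noteKeys, ∀ n3 ∈ noteKeys,
      identify_chord [n1, n2, n3] = identify_chord_alt [n1, n2, n3] := by
  decide

-- ===== VERDICT (by name: the statement is the Claim_ definition above) =====
theorem identify_chord_spec : Claim_equal_identify_chord := by
  intro notes _ hpre
  unfold Spec_identify_chord
  obtain ⟨hne, hmem⟩ := hpre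
  match notes with
  | [] => exact absurd rfl hne
  | [n1, n2, n3] =>
      exact triples_agree n1 (hmem n1 (by simp)) n2 (hmem n2 (by simp)) n3 (hmem n3 (by simp))
  | [a] =>
      rw [a_unknown_of_len_ne_three [a] (by simp), b_unknown_of_len_ne_three [a] (by simp)]
  | [a, b] =>
      rw [a_unknown_of_len_ne_three [a, b] (by simp), b_unknown_of_len_ne_three [a, b] (by simp)]
  | a :: b :: c :: d :: rest =>
      rw [a_unknown_of_len_ne_three (a :: b :: c :: d :: rest) (by simp),
          b_unknown_of_len_ne_three (a :: b :: c :: d :: rest) (by simp)]
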